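-- pv_equiv track=rewrite | github.com/kevinhanna/MLCategoryMapping | address_classifier/address_util.py | identify_tokens
-- ===== SOURCE A (Python) =====
-- STREET_TYPES = 'st', 'street', 'ave', 'avenue', 'ln', 'lane', 'cres', 'crescent', 'ct', 'court', 'rd', 'road', 'trail', 'blvd', 'pkwy'
--
-- SUITE_INDICATORS = 'suite', 'ste', '#', 'apt'
--
-- STREET_DIRECTIONS = 'n', 'e', 's', 'w', \
--                     'north', 'east', 'south', 'west', \
--                     'ne', 'nw', 'se', 'sw', \
--                     'north east', 'north west', 'south east', 'south west'
--
-- HIGHWAY_NAMES = 'us', 'highway', 'hwy', 'state', 'route'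
--
-- POBOX_INDICATORS = 'p.o.', 'box'
--
-- HIGHWAY_NAME = 30
--
-- STREET_DIRECTION = 500
--
-- STREET_TYPE = 60
--
-- SUITE_INDICATOR = 70
--
-- POBOX_INDICATOR = 1100
--
-- DASH = 200
--
-- COMMA = 210
--
-- ALPHA_STRING = 300
--
-- NUMERIC_STRING = 310
--
-- def normalize_address(address):
--     address = address.lower().replace('.', '').replace('-', ' - ').replace('#', ' # ').replace(',', ' , ')
--     return address
--
-- def identify_tokens(address):
--
--     tokens = normalize_address(address).split()
--
--     result = []
--
--     for token in tokens:
--         if (token in STREET_TYPES):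
--             result.append(STREET_TYPE)
--         elif (token in HIGHWAY_NAMES):
--             result.append(HIGHWAY_NAME)
--         elif (token in SUITE_INDICATORS):
--             result.append(SUITE_INDICATOR)
--         elif (token.isdigit()):
--             result.append(NUMERIC_STRING)
--         elif(token in STREET_DIRECTIONS):
--             result.append(STREET_DIRECTION)
--         elif (token == '-'):
--             result.append(DASH)
--         elif (token == ','):
--             result.append(COMMA)
--         elif (token in POBOX_INDICATORS):
--             result.append(POBOX_INDICATOR)
--         else:
--             result.append(ALPHA_STRING)
--
--     return result
-- ===== SOURCE B (Python) =====
-- STREET_TYPES = 'st', 'street', 'ave', 'avenue', 'ln', 'lane', 'cres', 'crescent', 'ct', 'court', 'rd', 'road', 'trail', 'blvd', 'pkwy'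
-- SUITE_INDICATORS = 'suite', 'ste', '#', 'apt'
-- STREET_DIRECTIONS = 'n', 'e', 's', 'w', \
--                     'north', 'east', 'south', 'west', \
--                     'ne', 'nw', 'se', 'sw', \
--                     'north east', 'north west', 'south east', 'south west'
-- HIGHWAY_NAMES = 'us', 'highway', 'hwy', 'state', 'route'
-- POBOX_INDICATORS = 'p.o.', 'box'
--
-- HIGHWAY_NAME = 30
-- STREET_DIRECTION = 500
-- STREET_TYPE = 60
-- SUITE_INDICATOR = 70
-- POBOX_INDICATOR = 1100
-- DASH = 200
-- COMMA = 210
-- ALPHA_STRING = 300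
-- NUMERIC_STRING = 310
--
-- # One keyword -> code table (the keyword groups are disjoint, so a single
-- # lookup reproduces the precedence of the original elif ladder exactly).
-- _CODE = {}
-- for _g, _c in ((STREET_TYPES, STREET_TYPE), (HIGHWAY_NAMES, HIGHWAY_NAME),
--                (SUITE_INDICATORS, SUITE_INDICATOR), (STREET_DIRECTIONS, STREET_DIRECTION)):
--     for _w in _g:
--         _CODE[_w] = _c
-- _CODE['-'] = DASH
-- _CODE[','] = COMMA
-- for _w in POBOX_INDICATORS:
--     _CODE[_w] = POBOX_INDICATOR
--
--
-- def _classify(token):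
--     code = _CODE.get(token)
--     if code is not None:
--         return code
--     return NUMERIC_STRING if token.isdigit() else ALPHA_STRING
--
--
-- def identify_tokens(address):
--     # Single character-level scan: tokenize and classify in one pass over the
--     # lowered string, without building any normalized intermediate string.
--     codes = []
--     buf = []
--     for c in address.lower():
--         if c == '.':
--             continue                      # '.' is deleted by normalization
--         if c.isspace():
--             if buf:
--                 codes.append(_classify(''.join(buf)))
--                 buf = []
--         elif c in '-#,':
--             if buf:
--                 codes.append(_classify(''.join(buf)))
--                 buf = []
--             codes.append(_CODE[c])        # '-', '#', ',' are tokens themselves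
--         else:
--             buf.append(c)
--     if buf:
--         codes.append(_classify(''.join(buf)))
--     return codes
-- ===== Notes on version B (the rewrite author's own statement) =====
-- stated objective: alternative
-- what changed: A normalizes via four whole-string replace passes, splits into a token list, then classifies each token through an 8-branch elif membership ladder; B makes a single character-level scan over the lowered string that tokenizes and classifies on the fly (separator characters emit their code directly, buffered words are classified by one lookup in a keyword-to-code table), building no intermediate string.
import Mathlib
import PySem

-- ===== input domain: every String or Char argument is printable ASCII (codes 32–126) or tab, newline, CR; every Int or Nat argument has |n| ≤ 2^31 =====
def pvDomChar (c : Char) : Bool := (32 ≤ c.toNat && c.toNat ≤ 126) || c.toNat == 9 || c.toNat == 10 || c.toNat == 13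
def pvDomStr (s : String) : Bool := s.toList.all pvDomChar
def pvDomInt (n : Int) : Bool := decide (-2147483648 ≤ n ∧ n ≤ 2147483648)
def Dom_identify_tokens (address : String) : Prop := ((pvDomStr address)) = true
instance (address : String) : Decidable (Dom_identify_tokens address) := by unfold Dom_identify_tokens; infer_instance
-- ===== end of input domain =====

-- B replaces A's normalize-replace-split-then-classify pipeline by a single
-- character-level scan that tokenizes and classifies in one pass via a
-- keyword→code table (objective: alternative; no intermediate string is built).


-- ===== PORT A =====
def STREET_TYPES : List String := ["st", "street", "ave", "avenue", "ln", "lane", "cres", "crescent", "ct", "court", "rd", "road", "trail", "blvd", "pkwy"]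
def SUITE_INDICATORS : List String := ["suite", "ste", "#", "apt"]
def STREET_DIRECTIONS : List String := ["n", "e", "s", "w", "north", "east", "south", "west", "ne", "nw", "se", "sw", "north east", "north west", "south east", "south west"]
def HIGHWAY_NAMES : List String := ["us", "highway", "hwy", "state", "route"]
def POBOX_INDICATORS : List String := ["p.o.", "box"]

def normalize_address (address : String) : String :=
  PySem.Str.replace (PySem.Str.replace (PySem.Str.replace (PySem.Str.replace
    (PySem.Str.lower address) "." "") "-" " - ") "#" " # ") "," " , "

def identify_tokens (address : String) : List Int :=
  let tokens := PySem.Str.split₀ (normalize_address address)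
  tokens.foldl (fun result token =>
    if token ∈ STREET_TYPES then result ++ [60]
    else if token ∈ HIGHWAY_NAMES then result ++ [30]
    else if token ∈ SUITE_INDICATORS then result ++ [70]
    else if PySem.Str.strIsdigit token then result ++ [310]
    else if token ∈ STREET_DIRECTIONS then result ++ [500]
    else if token = "-" then result ++ [200]
    else if token = "," then result ++ [210]
    else if token ∈ POBOX_INDICATORS then result ++ [1100]
    else result ++ [300]) []

-- ===== PORT B =====
-- Source B's module-level keyword→code table, built once in A's precedence order.
def pvCodeTable : PySem.Dict String Int :=
  let d := ([(STREET_TYPES, (60 : Int)), (HIGHWAY_NAMES, 30), (SUITE_INDICATORS, 70),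
             (STREET_DIRECTIONS, 500)]).foldl
    (fun d p => p.1.foldl (fun d w => d.insert w p.2) d) PySem.Dict.empty
  POBOX_INDICATORS.foldl (fun d w => d.insert w 1100) ((d.insert "-" 200).insert "," 210)

-- Source B's _classify: one table lookup, isdigit fallback.
def pvClassify (token : String) : Int :=
  match pvCodeTable.get? token with
  | some code => code
  | none => if PySem.Str.strIsdigit token then 310 else 300

-- Source B's loop: single scan over the lowered characters; buf holds the pending
-- token's characters, codes the codes emitted so far.  `_CODE[c]` in the
-- separator branch is ported as get?/getD 0: the KeyError default is dead code
-- because '-', '#', ',' are keys of the table.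
def pvScan : List Char → List Char → List Int → List Int
  | [], buf, codes =>
      if buf.isEmpty then codes else codes ++ [pvClassify (String.ofList buf)]
  | c :: cs, buf, codes =>
      if c = '.' then pvScan cs buf codes
      else if PySem.Chars.isspace c then
        pvScan cs [] (if buf.isEmpty then codes else codes ++ [pvClassify (String.ofList buf)])
      else if c = '-' ∨ c = '#' ∨ c = ',' then
        pvScan cs []
          ((if buf.isEmpty then codes else codes ++ [pvClassify (String.ofList buf)])
            ++ [(pvCodeTable.get? (String.ofList [c])).getD 0])
      else pvScan cs (buf ++ [c]) codes

def identify_tokens_alt (address : String) : List Int :=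
  pvScan (PySem.Chars.lower address.toList) [] []

-- ===== PRECONDITION & SPEC =====
def Spec_identify_tokens (address : String) (out : List Int) : Prop := out = identify_tokens_alt address
instance (address : String) (out : List Int) : Decidable (Spec_identify_tokens address out) := by unfold Spec_identify_tokens; infer_instance

-- ===== CLAIM (what is proved, stated in full; the proofs are below) =====
def Claim_equal_identify_tokens : Prop := ∀ (address : String), Dom_identify_tokens address → Spec_identify_tokens address (identify_tokens address)

-- ===== LEMMAS AND PROOFS =====

-- A's per-token classification, extracted from the loop body.
def pvClassA (token : String) : Int :=
  if token ∈ STREET_TYPES then 60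
  else if token ∈ HIGHWAY_NAMES then 30
  else if token ∈ SUITE_INDICATORS then 70
  else if PySem.Str.strIsdigit token then 310
  else if token ∈ STREET_DIRECTIONS then 500
  else if token = "-" then 200
  else if token = "," then 210
  else if token ∈ POBOX_INDICATORS then 1100
  else 300

-- The normalization, per character: '.' is deleted, '-', '#', ',' are spaced out.
def pvNormOne (c : Char) : List Char :=
  if c = '.' then []
  else if c = '-' ∨ c = '#' ∨ c = ',' then [' ', c, ' ']
  else [c]

-- Single-character replace is a flatMap.
theorem pvReplaceGo_single (a : Char) (new : List Char) :
    ∀ (fuel : Nat) (l acc : List Char), l.length ≤ fuel →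
      PySem.Chars.replace.go [a] new fuel l acc
        = acc.reverse ++ l.flatMap (fun c => if c = a then new else [c]) := by
  intro fuel
  induction fuel with
  | zero =>
    intro l acc h
    have : l = [] := List.length_eq_zero_iff.mp (Nat.le_zero.mp h)
    subst this; simp [PySem.Chars.replace.go]
  | succ n ih =>
    intro l acc h
    cases l with
    | nil => simp [PySem.Chars.replace.go]
    | cons c t =>
      by_cases hca : c = a
      · subst hca
        have hp : List.isPrefixOf [c] (c :: t) = true := by
          simp [List.isPrefixOf]
        simp only [PySem.Chars.replace.go, hp, if_true]
        rw [ih (List.drop [c].length (c :: t)) (new.reverse ++ acc) (by simp at h ⊢; omega)]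
        simp
      · have hp : List.isPrefixOf [a] (c :: t) = false := by
          simp [List.isPrefixOf, Ne.symm hca]
        simp only [PySem.Chars.replace.go, hp, Bool.false_eq_true, if_false]
        rw [ih t (c :: acc) (by simp at h ⊢; omega)]
        simp [hca]

theorem pvReplace_single (a : Char) (new cs : List Char) :
    PySem.Chars.replace cs [a] new = cs.flatMap (fun c => if c = a then new else [c]) := by
  simp only [PySem.Chars.replace, List.isEmpty_cons]
  exact pvReplaceGo_single a new cs.length cs [] le_rfl

-- The four replaces of normalize_address collapse to one flatMap of pvNormOne.
theorem pvNormalize_toList (address : String) :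
    (normalize_address address).toList
      = (PySem.Chars.lower address.toList).flatMap pvNormOne := by
  simp only [normalize_address, PySem.Str.toList_replace, PySem.Str.toList_lower]
  rw [show ("." : String).toList = ['.'] from rfl, show ("" : String).toList = [] from rfl,
      show ("-" : String).toList = ['-'] from rfl, show (" - " : String).toList = [' ', '-', ' '] from rfl,
      show ("#" : String).toList = ['#'] from rfl, show (" # " : String).toList = [' ', '#', ' '] from rfl,
      show ("," : String).toList = [','] from rfl, show (" , " : String).toList = [' ', ',', ' '] from rfl]
  rw [pvReplace_single, pvReplace_single, pvReplace_single, pvReplace_single]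
  rw [List.flatMap_assoc, List.flatMap_assoc, List.flatMap_assoc]
  apply List.flatMap_congr
  intro c _
  by_cases h1 : c = '.'
  · subst h1; simp [pvNormOne]
  by_cases h2 : c = '-'
  · subst h2; simp [pvNormOne]
  by_cases h3 : c = '#'
  · subst h3; simp [pvNormOne, h1]
  by_cases h4 : c = ','
  · subst h4; simp [pvNormOne, h1, h2]
  · simp [pvNormOne, h1, h2, h3, h4]

-- The split₀ worker's accumulator is a prefix of its result.
theorem pvSplitGo_acc (l : List Char) :
    ∀ (cur : List Char) (acc : List (List Char)),
      PySem.Chars.split₀.go l cur acc = acc.reverse ++ PySem.Chars.split₀.go l cur [] := by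
  induction l with
  | nil =>
    intro cur acc
    by_cases h : cur.isEmpty <;> simp [PySem.Chars.split₀.go, h]
  | cons c rest ih =>
    intro cur acc
    by_cases hs : PySem.Chars.isspace c
    · by_cases h : cur.isEmpty
      · simp only [PySem.Chars.split₀.go, hs, h, if_true]
        exact ih [] acc
      · simp only [PySem.Chars.split₀.go, hs, h, if_true, if_false, Bool.false_eq_true]
        rw [ih [] (cur.reverse :: acc), ih [] [cur.reverse]]
        simp
    · simp only [PySem.Chars.split₀.go, hs, Bool.false_eq_true, if_false]
      exact ih (c :: cur) acc

-- Main invariant: the B scanner computes, over the raw lowered characters, the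
-- classified tokens that A obtains by splitting the normalized string.
set_option maxRecDepth 8192 in
theorem pvScan_invariant :
    ∀ (cs buf : List Char) (codes : List Int),
      pvScan cs buf codes
        = codes ++ (PySem.Chars.split₀.go (cs.flatMap pvNormOne) buf.reverse []).map
            (fun t => pvClassify (String.ofList t)) := by
  intro cs
  induction cs with
  | nil =>
    intro buf codes
    by_cases h : buf.isEmpty
    · simp [pvScan, PySem.Chars.split₀.go, h]
    · simp [pvScan, PySem.Chars.split₀.go, h]
  | cons c rest ih =>
    intro buf codes
    by_cases h1 : c = '.'
    · subst h1
      rw [show pvScan ('.' :: rest) buf codes = pvScan rest buf codes from by simp [pvScan]]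
      simp only [List.flatMap_cons, pvNormOne, reduceIte, List.nil_append]
      exact ih buf codes
    by_cases h2 : PySem.Chars.isspace c = true
    · have hc2 : ¬ (c = '-' ∨ c = '#' ∨ c = ',') := by
        rintro (rfl | rfl | rfl) <;> simp [PySem.Chars.isspace] at h2
      have hnorm : pvNormOne c = [c] := by simp [pvNormOne, h1, hc2]
      rw [show pvScan (c :: rest) buf codes
          = pvScan rest []
              (if buf.isEmpty then codes else codes ++ [pvClassify (String.ofList buf)]) from by
        simp only [pvScan]; rw [if_neg h1, if_pos h2]]
      rw [ih [] _]
      simp only [List.flatMap_cons, hnorm, List.singleton_append, List.reverse_nil]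
      by_cases h : buf.isEmpty
      · have hb : buf = [] := List.isEmpty_iff.mp h
        subst hb
        rw [show PySem.Chars.split₀.go (c :: List.flatMap pvNormOne rest) [].reverse []
            = PySem.Chars.split₀.go (List.flatMap pvNormOne rest) [] [] from by
          simp [PySem.Chars.split₀.go, h2]]
        simp
      · have hb : buf.reverse.isEmpty = false := by
          simp only [List.isEmpty_reverse]; simpa using h
        rw [show PySem.Chars.split₀.go (c :: List.flatMap pvNormOne rest) buf.reverse []
            = PySem.Chars.split₀.go (List.flatMap pvNormOne rest) [] [buf] from by
          simp [PySem.Chars.split₀.go, h2, hb]]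
        rw [pvSplitGo_acc _ [] [buf]]
        simp [h]
    by_cases h3 : c = '-' ∨ c = '#' ∨ c = ','
    · have hnorm : pvNormOne c = [' ', c, ' '] := by simp [pvNormOne, h1, h3]
      have hspace : PySem.Chars.isspace ' ' = true := by decide
      have hgetd : (pvCodeTable.get? (String.ofList [c])).getD 0
          = pvClassify (String.ofList [c]) := by
        rcases h3 with rfl | rfl | rfl <;> decide
      rw [show pvScan (c :: rest) buf codes
          = pvScan rest []
              ((if buf.isEmpty then codes else codes ++ [pvClassify (String.ofList buf)])
                ++ [(pvCodeTable.get? (String.ofList [c])).getD 0]) from by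
        simp only [pvScan]; rw [if_neg h1, if_neg h2, if_pos h3]]
      rw [ih [] _]
      simp only [List.flatMap_cons, hnorm, List.cons_append, List.nil_append,
        List.reverse_nil]
      by_cases h : buf.isEmpty
      · have hb : buf = [] := List.isEmpty_iff.mp h
        subst hb
        rw [show PySem.Chars.split₀.go (' ' :: c :: ' ' :: List.flatMap pvNormOne rest) [].reverse []
            = PySem.Chars.split₀.go (List.flatMap pvNormOne rest) [] [[c]] from by
          simp [PySem.Chars.split₀.go, hspace, h2]]
        rw [pvSplitGo_acc _ [] [[c]]]
        simp [hgetd]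
      · have hb : buf.reverse.isEmpty = false := by
          simp only [List.isEmpty_reverse]; simpa using h
        rw [show PySem.Chars.split₀.go (' ' :: c :: ' ' :: List.flatMap pvNormOne rest) buf.reverse []
            = PySem.Chars.split₀.go (List.flatMap pvNormOne rest) [] [[c], buf] from by
          simp [PySem.Chars.split₀.go, hspace, h2, hb]]
        rw [pvSplitGo_acc _ [] [[c], buf]]
        simp [h, hgetd]
    · have hnorm : pvNormOne c = [c] := by simp [pvNormOne, h1, h3]
      rw [show pvScan (c :: rest) buf codes = pvScan rest (buf ++ [c]) codes from by
        simp only [pvScan]; rw [if_neg h1, if_neg h2, if_neg h3]]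
      rw [ih (buf ++ [c]) codes]
      simp only [List.flatMap_cons, hnorm, List.singleton_append]
      rw [show PySem.Chars.split₀.go (c :: List.flatMap pvNormOne rest) buf.reverse []
          = PySem.Chars.split₀.go (List.flatMap pvNormOne rest) (c :: buf.reverse) [] from by
        simp [PySem.Chars.split₀.go, h2]]
      simp

-- All of the table's keys, in insertion order.
def pvAllKeys : List String :=
  STREET_TYPES ++ HIGHWAY_NAMES ++ SUITE_INDICATORS ++ STREET_DIRECTIONS
    ++ ["-", ","] ++ POBOX_INDICATORS

set_option maxRecDepth 8192 in
theorem pvCodeTable_keys : pvCodeTable.keys = pvAllKeys := by decide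

-- A's elif ladder and B's one-lookup classification agree on every token
-- (the keyword groups are disjoint and none of them is a digit string).
set_option maxRecDepth 100000 in
theorem pvClassify_eq (t : String) : pvClassA t = pvClassify t := by
  by_cases h : t ∈ pvAllKeys
  · simp only [pvAllKeys, STREET_TYPES, HIGHWAY_NAMES, SUITE_INDICATORS,
      STREET_DIRECTIONS, POBOX_INDICATORS, List.cons_append, List.nil_append] at h
    fin_cases h <;> decide
  · have hnone : pvCodeTable.get? t = none := by
      rw [PySem.Dict.get?_eq_none_iff_not_mem_keys, pvCodeTable_keys]; exact h
    have hB : pvClassify t = if PySem.Str.strIsdigit t then 310 else 300 := by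
      unfold pvClassify; rw [hnone]
    have hST : t ∉ STREET_TYPES := fun hm => h (by simp [pvAllKeys, hm])
    have hHW : t ∉ HIGHWAY_NAMES := fun hm => h (by simp [pvAllKeys, hm])
    have hSU : t ∉ SUITE_INDICATORS := fun hm => h (by simp [pvAllKeys, hm])
    have hSD : t ∉ STREET_DIRECTIONS := fun hm => h (by simp [pvAllKeys, hm])
    have hPO : t ∉ POBOX_INDICATORS := fun hm => h (by simp [pvAllKeys, hm])
    have hdash : t ≠ "-" := fun e => h (by simp [pvAllKeys, e])
    have hcomma : t ≠ "," := fun e => h (by simp [pvAllKeys, e])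
    unfold pvClassA
    rw [hB, if_neg hST, if_neg hHW, if_neg hSU]
    by_cases hd : PySem.Chars.strIsdigit t.toList = true <;>
      simp [PySem.Str.strIsdigit_eq, hd, hSD, hdash, hcomma, hPO]

theorem identify_tokens_eq_alt (address : String) :
    identify_tokens address = identify_tokens_alt address := by
  unfold identify_tokens identify_tokens_alt
  have hbody : (fun (result : List Int) (token : String) =>
      if token ∈ STREET_TYPES then result ++ [60]
      else if token ∈ HIGHWAY_NAMES then result ++ [30]
      else if token ∈ SUITE_INDICATORS then result ++ [70]
      else if PySem.Str.strIsdigit token then result ++ [310]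
      else if token ∈ STREET_DIRECTIONS then result ++ [500]
      else if token = "-" then result ++ [200]
      else if token = "," then result ++ [210]
      else if token ∈ POBOX_INDICATORS then result ++ [1100]
      else result ++ [300])
      = fun result token => result ++ [pvClassA token] := by
    funext result token
    simp only [pvClassA]
    split_ifs <;> rfl
  rw [hbody, PySem.List.foldl_append_singleton_eq_map]
  rw [pvScan_invariant _ [] []]
  simp only [List.nil_append, List.reverse_nil]
  rw [show PySem.Str.split₀ (normalize_address address)
      = (PySem.Chars.split₀ (normalize_address address).toList).map String.ofList from rfl]
  rw [pvNormalize_toList]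
  rw [show PySem.Chars.split₀ ((PySem.Chars.lower address.toList).flatMap pvNormOne)
      = PySem.Chars.split₀.go ((PySem.Chars.lower address.toList).flatMap pvNormOne) [] [] from rfl]
  rw [List.map_map]
  exact List.map_congr_left (fun t _ => pvClassify_eq (String.ofList t))

-- ===== VERDICT (by name: the statement is the Claim_ definition above) =====
theorem identify_tokens_spec : Claim_equal_identify_tokens := by
  intro address _
  unfold Spec_identify_tokens
  exact identify_tokens_eq_alt address
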